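-- pv_equiv track=rewrite | github.com/ChanchalKumarMaji/CodeForces | 1333C.py | solve
-- ===== SOURCE A (Python) =====
-- def solve(a):
--     n = len(a)
--     prefix = [0] * (n+1)
--     for i in range(n):
--         prefix[i+1] = prefix[i] + a[i]
--     begin, end = 0, 0
--     res = 0
--     s = set([0])
--     while begin < n:
--         while (end < n) and (prefix[end+1] not in s):
--             end += 1
--             s.add(prefix[end])
--         res += end - begin
--         s.remove(prefix[begin])
--         begin += 1
--     return res
-- ===== SOURCE B (Python) =====
-- def solve(a):
--     pre = [0]
--     s = 0
--     for x in a: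
--         s += x
--         pre.append(s)
--     res = 0
--     left = 0
--     last = {}
--     for r in range(len(pre)):
--         p = pre[r]
--         if p in last and last[p] >= left:
--             left = last[p] + 1
--         res += r - left
--         last[p] = r
--     return res
-- ===== Notes on version B (the rewrite author's own statement) =====
-- stated objective: simpler
-- what changed: Replaces the two-pointer sliding window (inner while-loop extending `end`, set add/remove per step) by a single forward pass over prefix indices that keeps a dict of last-seen positions and a left boundary that jumps directly past the previous occurrence, summing r-left per right endpoint.
import Mathlib
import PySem

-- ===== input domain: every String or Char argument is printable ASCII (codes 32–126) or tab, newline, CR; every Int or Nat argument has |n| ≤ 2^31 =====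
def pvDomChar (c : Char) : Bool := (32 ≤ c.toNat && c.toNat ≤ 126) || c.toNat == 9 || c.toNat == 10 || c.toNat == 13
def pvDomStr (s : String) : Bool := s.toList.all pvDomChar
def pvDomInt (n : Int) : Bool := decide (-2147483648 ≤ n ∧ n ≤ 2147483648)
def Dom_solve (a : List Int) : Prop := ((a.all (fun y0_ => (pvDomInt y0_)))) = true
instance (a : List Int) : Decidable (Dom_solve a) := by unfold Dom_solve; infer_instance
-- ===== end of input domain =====

-- B replaces A's two-pointer window (inner while extending `end` with set add/remove) by one
-- forward pass keeping a last-occurrence dict and a jumping left boundary (objective: simpler).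

-- ===== PORT A =====
-- prefix array: Python fills prefix[i+1] = prefix[i] + a[i]; ported as a fold carrying
-- (list built so far, running value prefix[i]).
def pvPrefix (a : List Int) : List Int :=
  (a.foldl (fun (st : List Int × Int) x => (st.1 ++ [st.2 + x], st.2 + x)) ([0], 0)).1

-- inner `while (end < n) and (prefix[end+1] not in s): end += 1; s.add(prefix[end])`
-- (prefix[end+1] is always in range: end < n and len(prefix) = n+1; getD is exact here)
def solveInner (P : List Int) (n : Nat) (e : Nat) (s : PySem.Set Int) : Nat × PySem.Set Int :=
  if h : e < n ∧ PySem.Set.contains s (P.getD (e+1) 0) = false then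
    solveInner P n (e+1) (PySem.Set.add s (P.getD (e+1) 0))
  else (e, s)
termination_by n - e
decreasing_by omega

-- outer `while begin < n`; s.remove(prefix[begin]) never raises (prefix[begin] ∈ s throughout,
-- proved in the invariant below), so Set.discard is exact here
def solveOuter (P : List Int) (n : Nat) (b e : Nat) (s : PySem.Set Int) (res : Int) : Int :=
  if b < n then
    let p := solveInner P n e s
    solveOuter P n (b+1) p.1 (PySem.Set.discard p.2 (P.getD b 0)) (res + ((p.1 : Int) - (b : Int)))
  else res
termination_by n - b
decreasing_by omega

def solve (a : List Int) : Int :=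
  solveOuter (pvPrefix a) a.length 0 0 (PySem.Set.ofList [0]) 0

-- ===== PORT B =====
-- Source B builds pre by appending a running sum: same fold shape
def pvPrefixB (a : List Int) : List Int :=
  (a.foldl (fun (st : List Int × Int) x => (st.1 ++ [st.2 + x], st.2 + x)) ([0], 0)).1

-- one iteration of Source B's loop body; state = (res, left, last). pre[r] is in range (r < len(pre)).
def solveAltStep (pre : List Int) (st : Int × Int × PySem.Dict Int Int) (r : Nat) :
    Int × Int × PySem.Dict Int Int :=
  let p := pre.getD r 0
  let left := if st.2.2.contains p && decide (st.2.1 ≤ st.2.2.getD p 0)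
              then st.2.2.getD p 0 + 1 else st.2.1
  (st.1 + ((r : Int) - left), left, st.2.2.insert p (r : Int))

def solve_alt (a : List Int) : Int :=
  let pre := pvPrefixB a
  ((List.range pre.length).foldl (solveAltStep pre) (0, 0, PySem.Dict.empty)).1

-- ===== PRECONDITION & SPEC =====
def Spec_solve (a : List Int) (out : Int) : Prop := out = solve_alt a
instance (a : List Int) (out : Int) : Decidable (Spec_solve a out) := by unfold Spec_solve; infer_instance

-- ===== CLAIM (what is proved, stated in full; the proofs are below) =====
def Claim_equal_solve : Prop := ∀ (a : List Int), Dom_solve a → Spec_solve a (solve a)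

-- ===== LEMMAS AND PROOFS =====

-- `pvSeg P l r` = the prefix values at indices l..r
def pvSeg (P : List Int) (l r : Nat) : List Int := (P.take (r+1)).drop l
-- `pvGood P l r` = those values are pairwise distinct (no zero-sum subsegment inside)
abbrev pvGood (P : List Int) (l r : Nat) : Prop := (pvSeg P l r).Nodup
-- largest window end for a fixed left prefix index b
def pvE (P : List Int) (n b : Nat) : Nat := Nat.findGreatest (pvGood P b) n
lemma pvL_ex (P : List Int) (r : Nat) : ∃ l, pvGood P l r := by
  refine ⟨r+1, ?_⟩
  have : (P.take (r+1)).length ≤ r + 1 := by simp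
  simp [pvGood, pvSeg, List.drop_eq_nil_of_le this]
-- smallest window start for a fixed right prefix index r
def pvL (P : List Int) (r : Nat) : Nat := Nat.find (pvL_ex P r)

lemma nodup_short {xs : List Int} (h : xs.length ≤ 1) : xs.Nodup := by
  match xs with
  | [] => simp
  | [x] => simp
  | x :: y :: t => simp at h

lemma pvSeg_length (P : List Int) (l r : Nat) :
    (pvSeg P l r).length = min (r+1) P.length - l := by
  simp [pvSeg]

lemma pvGood_self (P : List Int) (b : Nat) : pvGood P b b := by
  apply nodup_short; rw [pvSeg_length]; omega

lemma pvGood_zero (P : List Int) (b : Nat) : pvGood P b 0 := by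
  apply nodup_short; rw [pvSeg_length]; omega

lemma pvSeg_append (P : List Int) (l r : Nat) (hl : l ≤ r + 1) (hr : r + 1 < P.length) :
    pvSeg P l (r+1) = pvSeg P l r ++ [P.getD (r+1) 0] := by
  have hD : P.getD (r+1) 0 = P[r+1] := by
    rw [List.getD_eq_getElem?_getD, List.getElem?_eq_getElem hr]; rfl
  have hlen : l ≤ (P.take (r+1)).length := by
    rw [List.length_take]; omega
  rw [pvSeg, pvSeg, show r + 1 + 1 = (r+1) + 1 from rfl, List.take_add_one,
    List.getElem?_eq_getElem hr, List.drop_append_of_le_length hlen, hD]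
  rfl

lemma pvSeg_cons (P : List Int) (l r : Nat) (hlr : l ≤ r) (hl : l < P.length) :
    pvSeg P l r = P.getD l 0 :: pvSeg P (l+1) r := by
  have h : l < (P.take (r+1)).length := by rw [List.length_take]; omega
  rw [pvSeg, pvSeg, List.drop_eq_getElem_cons h, List.getElem_take,
    List.getD_eq_getElem?_getD, List.getElem?_eq_getElem hl]
  rfl

lemma pvGood_mono_left {P : List Int} {l l' r : Nat} (h : pvGood P l r) (hll : l ≤ l') :
    pvGood P l' r := by
  have hs : pvSeg P l' r = (pvSeg P l r).drop (l' - l) := by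
    simp only [pvSeg, List.drop_drop]; congr 1; omega
  show (pvSeg P l' r).Nodup
  rw [hs]
  exact (List.drop_sublist _ _).nodup h

lemma pvGood_mono_right {P : List Int} {l r r' : Nat} (h : pvGood P l r') (hrr : r ≤ r') :
    pvGood P l r := by
  by_cases hl : l ≤ r + 1
  · have hs : pvSeg P l r = (pvSeg P l r').take (r + 1 - l) := by
      simp only [pvSeg, List.take_drop, List.take_take]
      congr 2; omega
    show (pvSeg P l r).Nodup
    rw [hs]
    exact (List.take_sublist _ _).nodup h
  · apply nodup_short; rw [pvSeg_length]; omega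

lemma mem_pvSeg {P : List Int} {l r : Nat} {x : Int} :
    x ∈ pvSeg P l r ↔ ∃ k, l ≤ k ∧ k ≤ r ∧ k < P.length ∧ P.getD k 0 = x := by
  constructor
  · intro hx
    rcases List.mem_iff_getElem.1 hx with ⟨i, hi, hval⟩
    have hlen : (pvSeg P l r).length = min (r+1) P.length - l := pvSeg_length P l r
    refine ⟨l + i, by omega, by omega, by omega, ?_⟩
    have hli : l + i < P.length := by omega
    rw [List.getD_eq_getElem?_getD, List.getElem?_eq_getElem hli]
    have : (pvSeg P l r)[i] = P[l + i] := by
      simp only [pvSeg, List.getElem_drop, List.getElem_take]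
    rw [← hval, this]; rfl
  · rintro ⟨k, hlk, hkr, hkP, hval⟩
    obtain ⟨i, rfl⟩ : ∃ i, k = l + i := ⟨k - l, by omega⟩
    have hlen : (pvSeg P l r).length = min (r+1) P.length - l := pvSeg_length P l r
    have hi : i < (pvSeg P l r).length := by omega
    apply List.mem_iff_getElem.2 ⟨i, hi, ?_⟩
    have hgl : (pvSeg P l r)[i] = P[l + i] := by
      simp only [pvSeg, List.getElem_drop, List.getElem_take]
    have hg : P.getD (l + i) 0 = P[l + i] := by
      rw [List.getD_eq_getElem?_getD, List.getElem?_eq_getElem hkP]; rfl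
    rw [hgl, ← hval, hg]

-- ===== E (max window end) =====
lemma pvE_le (P : List Int) (n b : Nat) : pvE P n b ≤ n := Nat.findGreatest_le n

lemma le_pvE {P : List Int} {n b : Nat} (hb : b ≤ n) : b ≤ pvE P n b :=
  Nat.le_findGreatest hb (pvGood_self P b)

lemma pvGood_pvE (P : List Int) (n b : Nat) : pvGood P b (pvE P n b) :=
  Nat.findGreatest_spec (Nat.zero_le n) (pvGood_zero P b)

lemma pvGood_iff_le_pvE {P : List Int} {n b r : Nat} (hr : r ≤ n) :
    pvGood P b r ↔ r ≤ pvE P n b := by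
  constructor
  · exact fun h => Nat.le_findGreatest hr h
  · exact fun h => pvGood_mono_right (pvGood_pvE P n b) h

-- ===== L (min window start) =====
lemma pvL_le_iff {P : List Int} {r l : Nat} : pvL P r ≤ l ↔ pvGood P l r := by
  constructor
  · exact fun h => pvGood_mono_left (Nat.find_spec (pvL_ex P r)) h
  · exact fun h => Nat.find_min' _ h

lemma pvL_le_self (P : List Int) (r : Nat) : pvL P r ≤ r :=
  pvL_le_iff.2 (pvGood_self P r)

lemma pvL_zero (P : List Int) : pvL P 0 = 0 :=
  Nat.le_zero.1 (pvL_le_self P 0)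

-- ===== sum swap =====
lemma sum_ind_Ioc (N b e : Nat) (hbe : b ≤ e) (heN : e < N) :
    (∑ r ∈ Finset.range N, (if b < r ∧ r ≤ e then (1:ℤ) else 0)) = (e : ℤ) - (b : ℤ) := by
  have h1 : ∀ r ∈ Finset.range N,
      (if b < r ∧ r ≤ e then (1:ℤ) else 0) = if r ∈ Finset.Ioc b e then 1 else 0 := by
    intro r _; simp [Finset.mem_Ioc]
  rw [Finset.sum_congr rfl h1, Finset.sum_ite_mem]
  have h2 : Finset.range N ∩ Finset.Ioc b e = Finset.Ioc b e := by
    apply Finset.inter_eq_right.2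
    intro x hx
    rw [Finset.mem_Ioc] at hx
    rw [Finset.mem_range]
    omega
  rw [h2, Finset.sum_const, Nat.card_Ioc]
  simp
  omega

lemma sum_ind_Ico (N c r : Nat) (hcr : c ≤ r) (hrN : r < N) :
    (∑ b ∈ Finset.range N, (if c ≤ b ∧ b < r then (1:ℤ) else 0)) = (r : ℤ) - (c : ℤ) := by
  have h1 : ∀ b ∈ Finset.range N,
      (if c ≤ b ∧ b < r then (1:ℤ) else 0) = if b ∈ Finset.Ico c r then 1 else 0 := by
    intro b _; simp [Finset.mem_Ico]
  rw [Finset.sum_congr rfl h1, Finset.sum_ite_mem]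
  have h2 : Finset.range N ∩ Finset.Ico c r = Finset.Ico c r := by
    apply Finset.inter_eq_right.2
    intro x hx
    rw [Finset.mem_Ico] at hx
    rw [Finset.mem_range]
    omega
  rw [h2, Finset.sum_const, Nat.card_Ico]
  simp
  omega

lemma sum_swap_EL (P : List Int) (n : Nat) :
    (∑ b ∈ Finset.range n, ((pvE P n b : ℤ) - (b : ℤ)))
      = ∑ r ∈ Finset.range (n+1), ((r : ℤ) - (pvL P r : ℤ)) := by
  have h1 : ∀ b ∈ Finset.range (n+1),
      (∑ r ∈ Finset.range (n+1), (if b < r ∧ pvGood P b r then (1:ℤ) else 0))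
        = (pvE P n b : ℤ) - (b : ℤ) := by
    intro b hb
    rw [Finset.mem_range] at hb
    have hb' : b ≤ n := by omega
    have hc : ∀ r ∈ Finset.range (n+1),
        (if b < r ∧ pvGood P b r then (1:ℤ) else 0)
          = if b < r ∧ r ≤ pvE P n b then 1 else 0 := by
      intro r hr
      rw [Finset.mem_range] at hr
      have hrn : r ≤ n := by omega
      exact if_congr (and_congr_right fun _ => pvGood_iff_le_pvE hrn) rfl rfl
    rw [Finset.sum_congr rfl hc]
    exact sum_ind_Ioc (n+1) b (pvE P n b) (le_pvE hb') (by have := pvE_le P n b; omega)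
  have h2 : ∀ r ∈ Finset.range (n+1),
      (∑ b ∈ Finset.range (n+1), (if b < r ∧ pvGood P b r then (1:ℤ) else 0))
        = (r : ℤ) - (pvL P r : ℤ) := by
    intro r hr
    rw [Finset.mem_range] at hr
    have hc : ∀ b ∈ Finset.range (n+1),
        (if b < r ∧ pvGood P b r then (1:ℤ) else 0)
          = if pvL P r ≤ b ∧ b < r then 1 else 0 := by
      intro b _
      refine if_congr ⟨fun h => ⟨pvL_le_iff.2 h.2, h.1⟩, fun h => ⟨h.2, pvL_le_iff.1 h.1⟩⟩ rfl rfl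
    rw [Finset.sum_congr rfl hc]
    exact sum_ind_Ico (n+1) (pvL P r) r (pvL_le_self P r) (by omega)
  have hEn : pvE P n n = n := le_antisymm (pvE_le P n n) (le_pvE le_rfl)
  calc (∑ b ∈ Finset.range n, ((pvE P n b : ℤ) - (b : ℤ)))
      = ∑ b ∈ Finset.range (n+1), ((pvE P n b : ℤ) - (b : ℤ)) := by
        rw [Finset.sum_range_succ, hEn]; ring
    _ = ∑ b ∈ Finset.range (n+1), ∑ r ∈ Finset.range (n+1),
          (if b < r ∧ pvGood P b r then (1:ℤ) else 0) := (Finset.sum_congr rfl h1).symm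
    _ = ∑ r ∈ Finset.range (n+1), ∑ b ∈ Finset.range (n+1),
          (if b < r ∧ pvGood P b r then (1:ℤ) else 0) := Finset.sum_comm
    _ = ∑ r ∈ Finset.range (n+1), ((r : ℤ) - (pvL P r : ℤ)) := Finset.sum_congr rfl h2

-- ===== A-side invariant =====
lemma innerA_stop {P : List Int} {n b e : Nat} {s : PySem.Set Int} (hP : P.length = n + 1)
    (hbe : b ≤ e + 1) (hen : e ≤ n) (hg : pvGood P b e)
    (hmem : ∀ x : Int, x ∈ s ↔ x ∈ pvSeg P b e)
    (hcond : ¬ (e < n ∧ PySem.Set.contains s (P.getD (e+1) 0) = false)) :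
    e = pvE P n b := by
  by_cases hlt : e < n
  · have hin : PySem.Set.contains s (P.getD (e+1) 0) = true := by
      rcases Bool.eq_false_or_eq_true (PySem.Set.contains s (P.getD (e+1) 0)) with h | h
      · exact h
      · exact absurd ⟨hlt, h⟩ hcond
    have hx : P.getD (e+1) 0 ∈ pvSeg P b e := (hmem _).1 ((PySem.Set.contains_iff s _).1 hin)
    have hle : e ≤ pvE P n b := Nat.le_findGreatest hen hg
    have hgt : ¬ pvGood P b (e+1) := by
      intro hgood
      have h' : (pvSeg P b e ++ [P.getD (e+1) 0]).Nodup := by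
        rw [← pvSeg_append P b e (by omega) (by omega)]; exact hgood
      rw [List.nodup_append] at h'
      exact h'.2.2 _ hx _ (List.mem_singleton_self _) rfl
    have hup : pvE P n b ≤ e := by
      by_contra hcon
      exact hgt (pvGood_mono_right (pvGood_pvE P n b) (by omega))
    omega
  · have he : e = n := by omega
    rw [he] at hg
    rw [he]
    exact (le_antisymm (pvE_le P n b) (Nat.le_findGreatest le_rfl hg)).symm

lemma solveInner_spec {P : List Int} {n : Nat} (hP : P.length = n + 1) :
    ∀ (k e : Nat) (s : PySem.Set Int) (b : Nat), n - e ≤ k → b ≤ e + 1 → e ≤ n →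
      pvGood P b e → (∀ x : Int, x ∈ s ↔ x ∈ pvSeg P b e) →
      (solveInner P n e s).1 = pvE P n b ∧
        (∀ x : Int, x ∈ (solveInner P n e s).2 ↔ x ∈ pvSeg P b (pvE P n b)) := by
  intro k
  induction k with
  | zero =>
    intro e s b hk hbe hen hg hmem
    have hcond : ¬ (e < n ∧ PySem.Set.contains s (P.getD (e+1) 0) = false) := by
      intro hc; omega
    have hE := innerA_stop hP hbe hen hg hmem hcond
    rw [solveInner, dif_neg hcond]
    exact ⟨hE, fun x => by rw [← hE]; exact hmem x⟩
  | succ k ih =>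
    intro e s b hk hbe hen hg hmem
    rw [solveInner]
    by_cases hc : e < n ∧ PySem.Set.contains s (P.getD (e+1) 0) = false
    · rw [dif_pos hc]
      obtain ⟨hlt, hnc⟩ := hc
      have hnotin : P.getD (e+1) 0 ∉ pvSeg P b e := by
        intro hx
        have hct : PySem.Set.contains s (P.getD (e+1) 0) = true :=
          (PySem.Set.contains_iff s _).2 ((hmem _).2 hx)
        rw [hnc] at hct
        exact Bool.false_ne_true hct
      have happ := pvSeg_append P b e (by omega) (by omega)
      have hg' : pvGood P b (e+1) := by
        show (pvSeg P b (e+1)).Nodup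
        rw [happ, List.nodup_append]
        refine ⟨hg, List.nodup_singleton _, ?_⟩
        intro x hx1 y hy heq
        rw [List.mem_singleton] at hy
        rw [heq, hy] at hx1
        exact hnotin hx1
      have hmem' : ∀ x : Int, x ∈ PySem.Set.add s (P.getD (e+1) 0) ↔ x ∈ pvSeg P b (e+1) := by
        intro x
        rw [PySem.Set.mem_add, happ, List.mem_append, List.mem_singleton, hmem x]
      exact ih (e+1) _ b (by omega) (by omega) (by omega) hg' hmem'
    · have hE := innerA_stop hP hbe hen hg hmem hc
      rw [dif_neg hc]
      exact ⟨hE, fun x => by rw [← hE]; exact hmem x⟩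

lemma solveOuter_spec {P : List Int} {n : Nat} (hP : P.length = n + 1) :
    ∀ (k b e : Nat) (s : PySem.Set Int) (res : Int), n - b ≤ k → b ≤ e + 1 → e ≤ n →
      pvGood P b e → (∀ x : Int, x ∈ s ↔ x ∈ pvSeg P b e) →
      solveOuter P n b e s res = res + ∑ l ∈ Finset.Ico b n, ((pvE P n l : ℤ) - (l : ℤ)) := by
  intro k
  induction k with
  | zero =>
    intro b e s res hk hbe hen hg hmem
    have hb : ¬ b < n := by omega
    rw [solveOuter, if_neg hb, Finset.Ico_eq_empty hb]
    simp
  | succ k ih =>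
    intro b e s res hk hbe hen hg hmem
    by_cases hb : b < n
    · rw [solveOuter, if_pos hb]
      obtain ⟨hfst, hsnd⟩ := solveInner_spec hP (n - e) e s b le_rfl hbe hen hg hmem
      show solveOuter P n (b+1) (solveInner P n e s).1
          (PySem.Set.discard (solveInner P n e s).2 (P.getD b 0))
          (res + (((solveInner P n e s).1 : ℤ) - (b : ℤ)))
        = res + ∑ l ∈ Finset.Ico b n, ((pvE P n l : ℤ) - (l : ℤ))
      rw [hfst]
      have hbm : b ≤ pvE P n b := le_pvE (by omega)
      have hmn : pvE P n b ≤ n := pvE_le P n b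
      have hcons := pvSeg_cons P b (pvE P n b) hbm (by omega)
      have hgE : pvGood P b (pvE P n b) := pvGood_pvE P n b
      have hcn : (P.getD b 0 :: pvSeg P (b+1) (pvE P n b)).Nodup := by rw [← hcons]; exact hgE
      rw [List.nodup_cons] at hcn
      have hmem'' : ∀ x : Int,
          x ∈ PySem.Set.discard (solveInner P n e s).2 (P.getD b 0) ↔
            x ∈ pvSeg P (b+1) (pvE P n b) := by
        intro x
        rw [PySem.Set.mem_discard, hsnd x]
        constructor
        · rintro ⟨hx, hne⟩
          rw [hcons] at hx
          rcases List.mem_cons.1 hx with h | h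
          · exact (hne h).elim
          · exact h
        · intro hx
          exact ⟨by rw [hcons]; exact List.mem_cons_of_mem _ hx,
            fun he' => hcn.1 (he' ▸ hx)⟩
      rw [ih (b+1) (pvE P n b) _ (res + ((pvE P n b : ℤ) - (b : ℤ)))
        (by omega) (by omega) hmn hcn.2 hmem'']
      rw [Finset.sum_eq_sum_Ico_succ_bot hb]
      ring
    · rw [solveOuter, if_neg hb, Finset.Ico_eq_empty hb]
      simp

-- ===== pvPrefix structure =====
def pvScan (c : Int) : List Int → List Int
  | [] => []
  | x :: xs => (c + x) :: pvScan (c + x) xs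

lemma fold_scan (xs : List Int) : ∀ (acc : List Int) (c : Int),
    (xs.foldl (fun (st : List Int × Int) x => (st.1 ++ [st.2 + x], st.2 + x)) (acc, c)).1
      = acc ++ pvScan c xs := by
  induction xs with
  | nil => intro acc c; simp [pvScan]
  | cons x xs ih =>
    intro acc c
    simp only [List.foldl_cons, pvScan, ih, List.append_assoc, List.singleton_append]

lemma pvPrefix_eq (a : List Int) : pvPrefix a = 0 :: pvScan 0 a := by
  rw [pvPrefix, fold_scan]
  rfl

lemma pvScan_length (xs : List Int) : ∀ c : Int, (pvScan c xs).length = xs.length := by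
  induction xs with
  | nil => intro c; rfl
  | cons x xs ih => intro c; simp [pvScan, ih]

lemma pvPrefix_length (a : List Int) : (pvPrefix a).length = a.length + 1 := by
  rw [pvPrefix_eq]
  simp [pvScan_length]

-- ===== B-side invariant =====
def pvDInv (P : List Int) (m : Nat) (d : PySem.Dict Int Int) : Prop :=
  ∀ (v j : Int), d.get? v = some j ↔
    ∃ jn : Nat, j = (jn : Int) ∧ jn < m ∧ P.getD jn 0 = v ∧
      ∀ k, jn < k → k < m → P.getD k 0 ≠ v

lemma pvGood_succ_iff {P : List Int} {n : Nat} (hP : P.length = n + 1) {m : Nat}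
    (hm : 1 ≤ m) (hmn : m ≤ n) (l : Nat) :
    pvGood P l m ↔ pvGood P l (m-1) ∧ P.getD m 0 ∉ pvSeg P l (m-1) := by
  by_cases hl : l ≤ m
  · have happ := pvSeg_append P l (m-1) (by omega) (by omega)
    have hmm : m - 1 + 1 = m := by omega
    rw [hmm] at happ
    constructor
    · intro h
      have h' : (pvSeg P l (m-1) ++ [P.getD m 0]).Nodup := by rw [← happ]; exact h
      rw [List.nodup_append] at h'
      exact ⟨h'.1, fun hx => h'.2.2 _ hx _ (List.mem_singleton_self _) rfl⟩
    · rintro ⟨h1, h2⟩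
      show (pvSeg P l m).Nodup
      rw [happ, List.nodup_append]
      refine ⟨h1, List.nodup_singleton _, ?_⟩
      intro x hx1 y hy heq
      rw [List.mem_singleton] at hy
      rw [heq, hy] at hx1
      exact h2 hx1
  · have hzero : pvSeg P l (m-1) = [] := by
      have : (pvSeg P l (m-1)).length = 0 := by rw [pvSeg_length]; omega
      exact List.eq_nil_of_length_eq_zero this
    have g1 : pvGood P l m := nodup_short (by rw [pvSeg_length]; omega)
    have g2 : pvGood P l (m-1) := nodup_short (by rw [pvSeg_length]; omega)
    exact ⟨fun _ => ⟨g2, by rw [hzero]; simp⟩, fun _ => g1⟩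

lemma pvL_succ_none {P : List Int} {n : Nat} (hP : P.length = n + 1) {m : Nat}
    (hm : 1 ≤ m) (hmn : m ≤ n)
    (hno : ∀ k, k < m → P.getD k 0 ≠ P.getD m 0) :
    pvL P m = pvL P (m-1) := by
  apply le_antisymm
  · apply pvL_le_iff.2
    rw [pvGood_succ_iff hP hm hmn]
    refine ⟨Nat.find_spec (pvL_ex P (m-1)), ?_⟩
    intro hx
    rcases mem_pvSeg.1 hx with ⟨k, _, hk2, _, hk4⟩
    exact hno k (by omega) hk4
  · exact pvL_le_iff.2 (pvGood_mono_right (Nat.find_spec (pvL_ex P m)) (by omega))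

lemma pvL_succ_last {P : List Int} {n : Nat} (hP : P.length = n + 1) {m jn : Nat}
    (hm : 1 ≤ m) (hmn : m ≤ n) (hj : jn < m) (hjv : P.getD jn 0 = P.getD m 0)
    (hlast : ∀ k, jn < k → k < m → P.getD k 0 ≠ P.getD m 0) :
    pvL P m = max (pvL P (m-1)) (jn + 1) := by
  have key : ∀ l, pvGood P l m ↔ (pvL P (m-1) ≤ l ∧ jn + 1 ≤ l) := by
    intro l
    rw [pvGood_succ_iff hP hm hmn]
    have hmem2 : P.getD m 0 ∈ pvSeg P l (m-1) ↔ l ≤ jn := by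
      rw [mem_pvSeg]
      constructor
      · rintro ⟨k, hk1, hk2, hk3, hk4⟩
        by_contra hcon
        exact hlast k (by omega) (by omega) hk4
      · intro hle
        exact ⟨jn, hle, by omega, by omega, hjv⟩
    rw [pvL_le_iff]
    constructor
    · rintro ⟨h1, h2⟩
      refine ⟨h1, ?_⟩
      by_contra hcon
      exact h2 (hmem2.2 (by omega))
    · rintro ⟨h1, h2⟩
      exact ⟨h1, fun hx => by have := hmem2.1 hx; omega⟩
  apply le_antisymm
  · exact pvL_le_iff.2 ((key _).2 ⟨Nat.le_max_left _ _, Nat.le_max_right _ _⟩)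
  · have h := (key (pvL P m)).1 (Nat.find_spec (pvL_ex P m))
    omega

lemma exists_last_occ {P : List Int} {p : Int} {m : Nat}
    (h : ∃ k, k < m ∧ P.getD k 0 = p) :
    ∃ jn, jn < m ∧ P.getD jn 0 = p ∧ ∀ k, jn < k → k < m → P.getD k 0 ≠ p := by
  obtain ⟨k0, hk0, hv0⟩ := h
  have hk0' : k0 ≤ m - 1 := by omega
  have hge : k0 ≤ Nat.findGreatest (fun k => P.getD k 0 = p) (m-1) :=
    Nat.le_findGreatest hk0' hv0
  have hle : Nat.findGreatest (fun k => P.getD k 0 = p) (m-1) ≤ m - 1 :=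
    Nat.findGreatest_le (m-1)
  refine ⟨Nat.findGreatest (fun k => P.getD k 0 = p) (m-1), by omega,
    Nat.findGreatest_spec (P := fun k => P.getD k 0 = p) hk0' hv0, ?_⟩
  intro k hk1 hk2
  exact Nat.findGreatest_is_greatest hk1 (by omega)

lemma pvDInv_insert {P : List Int} {m : Nat} {d : PySem.Dict Int Int}
    (hDInv : pvDInv P m d) :
    pvDInv P (m+1) (d.insert (P.getD m 0) (m : Int)) := by
  intro v j
  rw [PySem.Dict.get?_insert]
  by_cases hv : v = P.getD m 0
  · rw [if_pos hv]
    constructor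
    · intro h
      have hj : j = (m : Int) := by injection h with h; exact h.symm
      exact ⟨m, hj, by omega, hv.symm, fun k hk1 hk2 => by omega⟩
    · rintro ⟨jn, hj, hjm, hjv, hlast⟩
      have hjn : jn = m := by
        by_contra hne
        exact hlast m (by omega) (by omega) hv.symm
      rw [hj, hjn]
  · rw [if_neg hv, hDInv v j]
    constructor
    · rintro ⟨jn, hj, hjm, hjv, hlast⟩
      refine ⟨jn, hj, by omega, hjv, ?_⟩
      intro k hk1 hk2
      by_cases hkm : k = m
      · rw [hkm]; exact fun he => hv he.symm
      · exact hlast k hk1 (by omega)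
    · rintro ⟨jn, hj, hjm, hjv, hlast⟩
      have hne : jn ≠ m := fun he => hv (by rw [← hjv, he])
      exact ⟨jn, hj, by omega, hjv, fun k hk1 hk2 => hlast k hk1 (by omega)⟩

lemma solveAlt_fold_spec {P : List Int} {n : Nat} (hP : P.length = n + 1) :
    ∀ m, m ≤ n + 1 →
      ∃ d, (List.range m).foldl (solveAltStep P) (0, 0, PySem.Dict.empty)
          = (∑ k ∈ Finset.range m, ((k : ℤ) - (pvL P k : ℤ)),
             (if m = 0 then 0 else (pvL P (m-1) : ℤ)), d)
        ∧ pvDInv P m d := by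
  intro m
  induction m with
  | zero =>
    intro _
    refine ⟨PySem.Dict.empty, by simp, ?_⟩
    intro v j
    rw [PySem.Dict.get?_empty]
    constructor
    · intro h; cases h
    · rintro ⟨jn, _, hjm, _, _⟩; omega
  | succ m ih =>
    intro hm1
    obtain ⟨d, hfold, hDInv⟩ := ih (by omega)
    have hmn : m ≤ n := by omega
    have hleft : (if (d.contains (P.getD m 0) &&
          decide ((if m = 0 then 0 else (pvL P (m-1) : ℤ)) ≤ d.getD (P.getD m 0) 0))
          then d.getD (P.getD m 0) 0 + 1 else (if m = 0 then 0 else (pvL P (m-1) : ℤ)))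
        = (pvL P m : ℤ) := by
      by_cases hm0 : m = 0
      · have hcf : d.contains (P.getD m 0) = false := by
          rw [← PySem.Dict.get?_eq_none_iff_contains]
          cases hg : d.get? (P.getD m 0) with
          | none => rfl
          | some j =>
            rcases (hDInv _ _).1 hg with ⟨jn, _, hjm, _, _⟩
            omega
        rw [hcf]
        simp only [Bool.false_and, Bool.false_eq_true, if_false]
        rw [if_pos hm0, hm0, pvL_zero]
        simp
      · have hm' : 1 ≤ m := by omega
        rw [if_neg hm0]
        cases hg : d.get? (P.getD m 0) with
        | none =>
          have hcf : d.contains (P.getD m 0) = false :=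
            (PySem.Dict.get?_eq_none_iff_contains d _).1 hg
          rw [hcf]
          simp only [Bool.false_and, Bool.false_eq_true, if_false]
          have hno : ∀ k, k < m → P.getD k 0 ≠ P.getD m 0 := by
            intro k hk hkv
            obtain ⟨jn, hj1, hj2, hj3⟩ := exists_last_occ ⟨k, hk, hkv⟩
            have : d.get? (P.getD m 0) = some (jn : Int) :=
              (hDInv _ _).2 ⟨jn, rfl, hj1, hj2, hj3⟩
            rw [hg] at this
            cases this
          rw [pvL_succ_none hP hm' hmn hno]
        | some j =>
          rcases (hDInv _ _).1 hg with ⟨jn, hj, hjm, hjv, hlast⟩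
          have hcT : d.contains (P.getD m 0) = true := by
            rcases Bool.eq_false_or_eq_true (d.contains (P.getD m 0)) with h | h
            · exact h
            · rw [← PySem.Dict.get?_eq_none_iff_contains] at h
              rw [hg] at h
              cases h
          have hgetD : d.getD (P.getD m 0) 0 = j := by
            rw [PySem.Dict.getD_eq_get?_getD, hg]
            rfl
          rw [hcT, hgetD, hj]
          rw [pvL_succ_last hP hm' hmn hjm hjv hlast]
          by_cases hcmp : (pvL P (m-1) : ℤ) ≤ (jn : Int)
          · have : pvL P (m-1) ≤ jn := by exact_mod_cast hcmp
            rw [Bool.true_and, if_pos (decide_eq_true hcmp)]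
            push_cast
            omega
          · have : ¬ pvL P (m-1) ≤ jn := fun h => hcmp (by exact_mod_cast h)
            rw [Bool.true_and, if_neg (by simp [hcmp])]
            push_cast
            omega
    refine ⟨d.insert (P.getD m 0) (m : Int), ?_, ?_⟩
    · rw [List.range_succ, List.foldl_append, hfold]
      show solveAltStep P
          (∑ k ∈ Finset.range m, ((k : ℤ) - (pvL P k : ℤ)),
           (if m = 0 then 0 else (pvL P (m-1) : ℤ)), d) m = _
      simp only [solveAltStep]
      rw [hleft, Finset.sum_range_succ]
      simp
    · exact pvDInv_insert hDInv

-- ===== VERDICT (by name: the statement is the Claim_ definition above) =====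
theorem solve_spec : Claim_equal_solve := by
  intro a _
  show solve a = solve_alt a
  have hP : (pvPrefix a).length = a.length + 1 := pvPrefix_length a
  have hseg : pvSeg (pvPrefix a) 0 0 = [0] := by
    rw [pvSeg, pvPrefix_eq]
    simp
  have hmem0 : ∀ x : Int, x ∈ PySem.Set.ofList [0] ↔ x ∈ pvSeg (pvPrefix a) 0 0 := by
    intro x
    rw [hseg, PySem.Set.mem_ofList]
  have hA : solve a
      = ∑ l ∈ Finset.Ico 0 a.length, ((pvE (pvPrefix a) a.length l : ℤ) - (l : ℤ)) := by
    rw [solve, solveOuter_spec hP a.length 0 0 _ 0 le_rfl (by omega) (by omega)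
      (pvGood_self _ 0) hmem0]
    simp
  have hB : solve_alt a
      = ∑ r ∈ Finset.range (a.length + 1), ((r : ℤ) - (pvL (pvPrefix a) r : ℤ)) := by
    show ((List.range (pvPrefixB a).length).foldl (solveAltStep (pvPrefixB a))
        (0, 0, PySem.Dict.empty)).1 = _
    have hBB : pvPrefixB a = pvPrefix a := rfl
    rw [hBB, hP]
    obtain ⟨d, hfold, _⟩ := solveAlt_fold_spec hP (a.length + 1) le_rfl
    rw [hfold]
  rw [hA, hB, ← Finset.range_eq_Ico]
  exact sum_swap_EL (pvPrefix a) a.length
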